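-- pv_equiv track=rewrite | github.com/MarkwwLiu/selenium | export_test.py | _merge_multiline_calls
-- ===== SOURCE A (Python) =====
-- def _merge_multiline_calls(source: str) -> str:
--     """將跨行的函式呼叫合併為單行，方便後續處理。"""
--     lines = source.split('\n')
--     merged = []
--     buffer = ''
--     paren_depth = 0
--
--     for line in lines:
--         if buffer:
--             buffer += ' ' + line.strip()
--             paren_depth += line.count('(') - line.count(')')
--             if paren_depth <= 0:
--                 merged.append(buffer)
--                 buffer = ''
--                 paren_depth = 0
--         elif 'load_test_data(' in line and line.count('(') > line.count(')'):
--             buffer = line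
--             paren_depth = line.count('(') - line.count(')')
--         else:
--             merged.append(line)
--
--     if buffer:
--         merged.append(buffer)
--
--     return '\n'.join(merged)
-- ===== SOURCE B (Python) =====
-- def _merge_multiline_calls(source: str) -> str:
--     """將跨行的函式呼叫合併為單行，方便後續處理。"""
--     lines = source.split('\n')
--     out = []
--     n = len(lines)
--     i = 0
--     while i < n:
--         line = lines[i]
--         if 'load_test_data(' in line and line.count('(') > line.count(')'):
--             depth = line.count('(') - line.count(')')
--             parts = [line]
--             j = i + 1
--             while j < n and depth > 0:
--                 parts.append(lines[j].strip())
--                 depth += lines[j].count('(') - lines[j].count(')')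
--                 j += 1
--             out.append(' '.join(parts))
--             i = j
--         else:
--             out.append(line)
--             i += 1
--     return '\n'.join(out)
-- ===== Notes on version B (the rewrite author's own statement) =====
-- stated objective: alternative
-- what changed: Replaces A's single pass carrying buffer/paren_depth state across iterations by an index-based outer loop with an inner greedy while-loop that consumes one whole multiline call block at a time, collecting its parts in a list joined at the end.
import Mathlib
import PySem

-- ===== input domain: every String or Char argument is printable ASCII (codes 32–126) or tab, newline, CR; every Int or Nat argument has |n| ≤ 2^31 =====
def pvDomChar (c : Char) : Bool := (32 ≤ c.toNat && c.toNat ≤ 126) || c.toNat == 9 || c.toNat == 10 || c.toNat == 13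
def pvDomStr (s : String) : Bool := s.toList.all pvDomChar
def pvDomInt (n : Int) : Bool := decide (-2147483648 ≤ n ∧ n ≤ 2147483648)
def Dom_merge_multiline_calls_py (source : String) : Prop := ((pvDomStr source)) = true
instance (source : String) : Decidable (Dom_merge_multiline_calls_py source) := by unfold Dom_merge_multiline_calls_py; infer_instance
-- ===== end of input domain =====

-- B replaces A's carried buffer/paren-depth state machine by an index-based outer loop with an
-- inner greedy while-loop that consumes a whole multiline call at once (objective: alternative
-- decomposition, same cost).

-- shared small expressions of both Pythons: line.count('(') - line.count(')') and the trigger test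
def mmcCnt (l : List Char) : Int :=
  (PySem.Chars.count l ['('] : Int) - (PySem.Chars.count l [')'] : Int)

def mmcTrig (l : List Char) : Bool :=
  PySem.Chars.isIn "load_test_data(".toList l
    && decide (PySem.Chars.count l [')'] < PySem.Chars.count l ['('])

-- ===== PORT A =====
-- one iteration of A's for-loop over (merged, buffer, paren_depth)
def mmcStepA (st : List (List Char) × List Char × Int) (line : List Char) :
    List (List Char) × List Char × Int :=
  let merged := st.1
  let buffer := st.2.1
  let depth := st.2.2
  if buffer ≠ [] then
    let buffer' := buffer ++ ' ' :: PySem.Chars.strip line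
    let depth' := depth + mmcCnt line
    if depth' ≤ 0 then (merged ++ [buffer'], [], 0) else (merged, buffer', depth')
  else if mmcTrig line then (merged, line, mmcCnt line)
  else (merged ++ [line], buffer, depth)

-- the trailing 'if buffer: merged.append(buffer)'
def mmcFlush (st : List (List Char) × List Char × Int) : List (List Char) :=
  if st.2.1 ≠ [] then st.1 ++ [st.2.1] else st.1

def merge_multiline_calls_py (source : String) : String :=
  let lines := PySem.Chars.splitOn source.toList ['\n']
  String.ofList (PySem.Chars.join ['\n'] (mmcFlush (lines.foldl mmcStepA ([], [], 0))))

-- ===== PORT B =====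
-- B's inner 'while j < n and depth > 0' loop, fuel-bounded (fuel ≥ n - j makes it the while loop);
-- returns (parts, j)
def mmcInner (lines : List (List Char)) :
    Nat → Nat → Int → List (List Char) → List (List Char) × Nat
  | 0, j, _, parts => (parts, j)
  | fuel + 1, j, depth, parts =>
    if h : j < lines.length ∧ 0 < depth then
      mmcInner lines fuel (j + 1) (depth + mmcCnt lines[j]) (parts ++ [PySem.Chars.strip lines[j]])
    else (parts, j)

-- B's outer 'while i < n' loop, fuel-bounded (fuel ≥ n - i makes it the while loop)
def mmcOuter (lines : List (List Char)) : Nat → Nat → List (List Char)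
  | 0, _ => []
  | fuel + 1, i =>
    if h : i < lines.length then
      if mmcTrig lines[i] then
        let r := mmcInner lines fuel (i + 1) (mmcCnt lines[i]) [lines[i]]
        PySem.Chars.join [' '] r.1 :: mmcOuter lines fuel r.2
      else lines[i] :: mmcOuter lines fuel (i + 1)
    else []

def merge_multiline_calls_py_alt (source : String) : String :=
  let lines := PySem.Chars.splitOn source.toList ['\n']
  String.ofList (PySem.Chars.join ['\n'] (mmcOuter lines lines.length 0))

-- ===== PRECONDITION & SPEC =====
def Spec_merge_multiline_calls_py (source : String) (out : String) : Prop := out = merge_multiline_calls_py_alt source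
instance (source : String) (out : String) : Decidable (Spec_merge_multiline_calls_py source out) := by unfold Spec_merge_multiline_calls_py; infer_instance

-- ===== CLAIM (what is proved, stated in full; the proofs are below) =====
def Claim_equal_merge_multiline_calls_py : Prop := ∀ (source : String), Dom_merge_multiline_calls_py source → Spec_merge_multiline_calls_py source (merge_multiline_calls_py source)

-- ===== LEMMAS AND PROOFS =====

-- common recursive description of the remaining output, given the remaining lines and A's state
def mmcRun : List (List Char) → List Char → Int → List (List Char)
  | [], buffer, _ => if buffer = [] then [] else [buffer]
  | l :: rest, buffer, depth =>
    if buffer = [] then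
      if mmcTrig l then mmcRun rest l (mmcCnt l)
      else l :: mmcRun rest [] depth
    else
      if depth + mmcCnt l ≤ 0 then (buffer ++ ' ' :: PySem.Chars.strip l) :: mmcRun rest [] 0
      else mmcRun rest (buffer ++ ' ' :: PySem.Chars.strip l) (depth + mmcCnt l)

-- A's fold-then-flush computes mmcRun
theorem foldA_eq_run (rest : List (List Char)) :
    ∀ (merged : List (List Char)) (buffer : List Char) (depth : Int),
      mmcFlush (rest.foldl mmcStepA (merged, buffer, depth)) = merged ++ mmcRun rest buffer depth := by
  induction rest with
  | nil =>
    intro merged buffer depth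
    by_cases hb : buffer = [] <;> simp [mmcFlush, mmcRun, hb]
  | cons l rest ih =>
    intro merged buffer depth
    simp only [List.foldl_cons, mmcRun]
    by_cases hb : buffer = []
    · subst hb
      by_cases ht : mmcTrig l
      · simp [mmcStepA, ht, ih]
      · simp [mmcStepA, ht, ih]
    · by_cases hd : depth + mmcCnt l ≤ 0
      · simp [mmcStepA, hb, hd, ih]
      · simp [mmcStepA, hb, hd, ih]

theorem join_cons₂ (sep x x' : List Char) (t : List (List Char)) :
    PySem.Chars.join sep (x :: x' :: t) = x ++ sep ++ PySem.Chars.join sep (x' :: t) := by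
  simp [PySem.Chars.join, List.intercalate, List.intersperse_cons₂]

theorem join_append_singleton (sep y : List Char) :
    ∀ (xs : List (List Char)), xs ≠ [] →
      PySem.Chars.join sep (xs ++ [y]) = PySem.Chars.join sep xs ++ sep ++ y := by
  intro xs
  induction xs with
  | nil => intro h; exact absurd rfl h
  | cons x t ih =>
    intro _
    cases t with
    | nil => simp [PySem.Chars.join, List.intercalate]
    | cons x' t' =>
      have ih' := ih (by simp)
      rw [List.cons_append] at ih'
      rw [List.cons_append, List.cons_append, join_cons₂, ih', join_cons₂]
      simp [List.append_assoc]

-- the inner loop never moves the index backwards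
theorem mmcInner_ge (lines : List (List Char)) :
    ∀ (fuel j : Nat) (depth : Int) (parts : List (List Char)),
      j ≤ (mmcInner lines fuel j depth parts).2 := by
  intro fuel
  induction fuel with
  | zero => intro j depth parts; rw [mmcInner]
  | succ fuel ih =>
    intro j depth parts
    rw [mmcInner]
    by_cases h : j < lines.length ∧ 0 < depth
    · rw [dif_pos h]
      have := ih (j + 1) (depth + mmcCnt lines[j]) (parts ++ [PySem.Chars.strip lines[j]])
      omega
    · rw [dif_neg h]

-- with non-positive depth the inner loop stops at once
theorem mmcInner_nonpos (lines : List (List Char)) (fuel j : Nat) (depth : Int)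
    (parts : List (List Char)) (hd : depth ≤ 0) :
    mmcInner lines fuel j depth parts = (parts, j) := by
  cases fuel with
  | zero => rw [mmcInner]
  | succ fuel => rw [mmcInner, dif_neg (by omega)]

-- B's inner loop matches mmcRun in buffer mode
theorem inner_eq_run (lines : List (List Char)) :
    ∀ (fuel j : Nat) (depth : Int) (parts : List (List Char)),
      lines.length - j ≤ fuel → parts ≠ [] → PySem.Chars.join [' '] parts ≠ [] → 0 < depth →
        mmcRun (lines.drop j) (PySem.Chars.join [' '] parts) depth
          = PySem.Chars.join [' '] (mmcInner lines fuel j depth parts).1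
              :: mmcRun (lines.drop (mmcInner lines fuel j depth parts).2) [] 0 := by
  intro fuel
  induction fuel with
  | zero =>
    intro j depth parts hf hp hjp hd
    rw [mmcInner]
    rw [List.drop_of_length_le (by omega)]
    simp [mmcRun, hjp]
  | succ fuel ih =>
    intro j depth parts hf hp hjp hd
    rw [mmcInner]
    by_cases hj : j < lines.length
    · rw [dif_pos ⟨hj, hd⟩]
      have hdrop : lines.drop j = lines[j] :: lines.drop (j + 1) :=
        List.drop_eq_getElem_cons hj
      rw [hdrop, mmcRun, if_neg hjp]
      have hjoin : PySem.Chars.join [' '] parts ++ ' ' :: PySem.Chars.strip lines[j]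
          = PySem.Chars.join [' '] (parts ++ [PySem.Chars.strip lines[j]]) := by
        rw [join_append_singleton [' '] _ parts hp]; simp
      have hne : PySem.Chars.join [' '] (parts ++ [PySem.Chars.strip lines[j]]) ≠ [] := by
        rw [join_append_singleton [' '] _ parts hp]; simp
      by_cases hd' : depth + mmcCnt lines[j] ≤ 0
      · rw [if_pos hd', hjoin, mmcInner_nonpos lines fuel (j + 1) _ _ hd']
      · rw [if_neg hd', hjoin]
        exact ih (j + 1) _ _ (by omega) (by simp) hne (by omega)
    · rw [dif_neg (by omega)]
      rw [List.drop_of_length_le (by omega)]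
      simp [mmcRun, hjp]

-- a line triggering the merge is nonempty
theorem trig_ne_nil (l : List Char) (h : mmcTrig l = true) : l ≠ [] := by
  intro he
  subst he
  rw [mmcTrig] at h
  simp only [Bool.and_eq_true] at h
  have := (PySem.Chars.isIn_iff_infix _ _).mp h.1
  simp_all [List.infix_nil]

-- a line triggering the merge opens positive depth
theorem trig_pos (l : List Char) (h : mmcTrig l = true) : 0 < mmcCnt l := by
  rw [mmcTrig] at h
  simp only [Bool.and_eq_true, decide_eq_true_eq] at h
  have := h.2
  rw [mmcCnt]
  omega

-- B's outer loop computes mmcRun from the empty state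
theorem outer_eq_run (lines : List (List Char)) :
    ∀ (fuel i : Nat), lines.length - i ≤ fuel →
      mmcRun (lines.drop i) [] 0 = mmcOuter lines fuel i := by
  intro fuel
  induction fuel with
  | zero =>
    intro i hf
    rw [mmcOuter, List.drop_of_length_le (by omega), mmcRun, if_pos rfl]
  | succ fuel ih =>
    intro i hf
    rw [mmcOuter]
    by_cases h : i < lines.length
    · rw [dif_pos h]
      have hdrop : lines.drop i = lines[i] :: lines.drop (i + 1) :=
        List.drop_eq_getElem_cons h
      by_cases ht : mmcTrig lines[i]
      · rw [if_pos ht, hdrop, mmcRun, if_pos rfl, if_pos ht]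
        have hjs : PySem.Chars.join [' '] [lines[i]] = lines[i] := by
          simp [PySem.Chars.join, List.intercalate]
        rw [show mmcRun (lines.drop (i + 1)) lines[i] (mmcCnt lines[i])
              = mmcRun (lines.drop (i + 1)) (PySem.Chars.join [' '] [lines[i]]) (mmcCnt lines[i]) by
            rw [hjs]]
        rw [inner_eq_run lines fuel (i + 1) (mmcCnt lines[i]) [lines[i]] (by omega) (by simp)
            (by rw [hjs]; exact trig_ne_nil _ ht) (trig_pos _ ht)]
        have hge := mmcInner_ge lines fuel (i + 1) (mmcCnt lines[i]) [lines[i]]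
        rw [ih (mmcInner lines fuel (i + 1) (mmcCnt lines[i]) [lines[i]]).2 (by omega)]
      · rw [if_neg ht, hdrop, mmcRun, if_pos rfl, if_neg (by simpa using ht), ih (i + 1) (by omega)]
    · rw [dif_neg h, List.drop_of_length_le (by omega), mmcRun, if_pos rfl]

-- ===== VERDICT (by name: the statement is the Claim_ definition above) =====
theorem merge_multiline_calls_py_spec : Claim_equal_merge_multiline_calls_py := by
  intro source _
  unfold Spec_merge_multiline_calls_py merge_multiline_calls_py merge_multiline_calls_py_alt
  dsimp only
  rw [foldA_eq_run, List.nil_append]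
  have h0 := outer_eq_run (PySem.Chars.splitOn source.toList ['\n'])
      (PySem.Chars.splitOn source.toList ['\n']).length 0 (by omega)
  rw [List.drop_zero] at h0
  rw [h0]
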